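-- pv_equiv track=rewrite | github.com/gurami112/Goa | Day 023/Classwork/task2.py | even_replace
-- ===== SOURCE A (Python) =====
-- def even_replace(string,replace):
--     new_str = ""
--     for i in range(len(string)):
--         if i % 2 == 0:
--             new_str += replace
--         else:
--             new_str += string[i]
--     return new_str
-- ===== SOURCE B (Python) =====
-- def even_replace(string, replace):
--     # stride-2 pass: each even position contributes `replace` plus the
--     # following odd-position character (empty slice at the end), no branch
--     return ''.join(replace + string[i + 1:i + 2] for i in range(0, len(string), 2))
-- ===== Notes on version B (the rewrite author's own statement) =====
-- stated objective: simpler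
-- what changed: Replaces the per-index loop with a parity branch by a branch-free stride-2 join: each even index emits the replacement plus the following character as a one-char slice (empty at the end).
import Mathlib
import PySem

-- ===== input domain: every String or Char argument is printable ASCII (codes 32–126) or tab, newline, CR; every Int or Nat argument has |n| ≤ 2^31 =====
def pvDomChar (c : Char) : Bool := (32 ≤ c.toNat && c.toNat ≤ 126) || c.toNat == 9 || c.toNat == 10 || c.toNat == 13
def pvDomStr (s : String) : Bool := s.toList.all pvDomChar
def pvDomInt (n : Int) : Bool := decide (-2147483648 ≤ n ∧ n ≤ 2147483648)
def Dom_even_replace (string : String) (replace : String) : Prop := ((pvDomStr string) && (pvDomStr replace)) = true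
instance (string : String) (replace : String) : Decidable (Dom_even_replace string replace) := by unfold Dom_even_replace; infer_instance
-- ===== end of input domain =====

-- B replaces A's per-index loop with a parity branch by a branch-free stride-2 join
-- (replacement plus the following one-character slice per even index); objective: simpler.


-- ===== PORT A =====
-- literal port of A: new_str = ""; for i in range(len(string)): even -> += replace, odd -> += string[i]
def even_replace (string : String) (replace : String) : String :=
  String.ofList <|
    (PySem.List.pyRange 0 (PySem.Str.len string) 1).foldl
      (fun new_str i =>
        if PySem.Int.mod i 2 = 0 then new_str ++ replace.toList
        else new_str ++ (match PySem.Str.pyGet? string i with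
          | some c => [c]
          | none => []))   -- i ∈ range(len(string)), so pyGet? is always some; none is unreachable
      []

-- ===== PORT B =====
-- literal port of B: ''.join(replace + string[i+1:i+2] for i in range(0, len(string), 2))
def even_replace_alt (string : String) (replace : String) : String :=
  String.ofList
    ((PySem.List.pyRange 0 (PySem.Str.len string) 2).map
      (fun i => replace.toList ++ PySem.Chars.slice string.toList (some (i + 1)) (some (i + 2)))).flatten

-- ===== PRECONDITION & SPEC =====
def Spec_even_replace (string : String) (replace : String) (out : String) : Prop := out = even_replace_alt string replace
instance (string : String) (replace : String) (out : String) : Decidable (Spec_even_replace string replace out) := by unfold Spec_even_replace; infer_instance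

-- ===== CLAIM (what is proved, stated in full; the proofs are below) =====
def Claim_equal_even_replace : Prop := ∀ (string : String) (replace : String), Dom_even_replace string replace → Spec_even_replace string replace (even_replace string replace)

-- ===== LEMMAS AND PROOFS =====

-- the common recursive shape: two characters at a time
def specF (r : List Char) : List Char → List Char
  | [] => []
  | [_] => r
  | _ :: b :: rest => r ++ b :: specF r rest

def gA (r s : List Char) (k : Nat) : List Char :=
  if k % 2 = 0 then r else (match s[k]? with | some c => [c] | none => [])

def gB (r s : List Char) (k : Nat) : List Char := r ++ (s.drop (2 * k + 1)).take 1

lemma specA (s r : List Char) :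
    (List.range s.length).flatMap (gA r s) = specF r s := by
  induction s using specF.induct with
  | case1 => simp [specF]
  | case2 a => simp [specF, gA]
  | case3 a b rest ih =>
    have hshift : ∀ k, gA r (a :: b :: rest) (k + 2) = gA r rest k := by
      intro k; simp [gA, Nat.add_mod_right]
    have hrange : List.range (rest.length + 2) =
        0 :: 1 :: (List.range rest.length).map (fun k => k + 2) := by
      rw [List.range_succ_eq_map, List.range_succ_eq_map]
      simp [Nat.succ_eq_add_one]
    calc (List.range (a :: b :: rest).length).flatMap (gA r (a :: b :: rest))
        = (0 :: 1 :: (List.range rest.length).map (fun k => k + 2)).flatMap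
            (gA r (a :: b :: rest)) := by
          simp only [List.length_cons]; rw [hrange]
      _ = gA r (a :: b :: rest) 0 ++ (gA r (a :: b :: rest) 1 ++
            (List.range rest.length).flatMap (gA r rest)) := by
          simp only [List.flatMap_cons, List.flatMap_map, hshift]
      _ = specF r (a :: b :: rest) := by
          rw [ih]; simp [gA, specF]

lemma specB (s r : List Char) :
    (List.range ((s.length + 1) / 2)).flatMap (gB r s) = specF r s := by
  induction s using specF.induct with
  | case1 => simp [specF]
  | case2 a => simp [specF, gB]
  | case3 a b rest ih =>
    have hc : ((a :: b :: rest).length + 1) / 2 = (rest.length + 1) / 2 + 1 := by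
      simp only [List.length_cons]; omega
    have hshift : ∀ k, gB r (a :: b :: rest) (k + 1) = gB r rest k := by
      intro k
      have : 2 * (k + 1) + 1 = (2 * k + 1) + 2 := by omega
      simp [gB, this, List.drop_succ_cons]
    rw [hc, List.range_succ_eq_map, List.flatMap_cons, List.flatMap_map]
    simp only [Nat.succ_eq_add_one, hshift]
    rw [ih]
    simp [gB, specF]

-- A's fold, normalised to a flatMap over List.range of gA
lemma portA_eq (string replace : String) :
    even_replace string replace = String.ofList (specF replace.toList string.toList) := by
  unfold even_replace
  rw [← specA string.toList replace.toList]
  congr 1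
  have hbody : ∀ (acc : List Char) (i : Int),
      (if PySem.Int.mod i 2 = 0 then acc ++ replace.toList
       else acc ++ (match PySem.Str.pyGet? string i with | some c => [c] | none => [])) =
      acc ++ (if PySem.Int.mod i 2 = 0 then replace.toList
              else (match PySem.Str.pyGet? string i with | some c => [c] | none => [])) := by
    intro acc i; split <;> rfl
  simp only [hbody]
  rw [PySem.List.foldl_append_eq_flatMap]
  simp only [List.nil_append]
  have hlen : PySem.Str.len string = (string.toList.length : Int) := by
    simp [PySem.Str.len_eq]
  rw [hlen, PySem.List.pyRange_one]
  simp only [Int.sub_zero, Int.toNat_natCast, List.flatMap_map]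
  apply List.flatMap_congr
  intro k _
  have hdvd : ((2 : Int) ∣ (k : Int)) ↔ k % 2 = 0 := by omega
  simp [gA, zero_add, hdvd]

-- B's map+flatten, normalised to a flatMap over List.range of gB
lemma portB_eq (string replace : String) :
    even_replace_alt string replace = String.ofList (specF replace.toList string.toList) := by
  unfold even_replace_alt
  rw [← specB string.toList replace.toList]
  congr 1
  rw [← List.flatMap_def]
  have hlen : PySem.Str.len string = (string.toList.length : Int) := by
    simp [PySem.Str.len_eq]
  rw [hlen, PySem.List.pyRange_of_pos 0 (string.toList.length : Int) (by norm_num)]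
  have hcount : (if (0:Int) < (string.toList.length : Int)
      then ((((string.toList.length : Int)) - 0 + 2 - 1) / 2).toNat else 0) =
      (string.toList.length + 1) / 2 := by
    split <;> omega
  rw [hcount, List.flatMap_map]
  apply List.flatMap_congr
  intro k _
  have h1 : (0 : Int) + 2 * (k : Int) + 1 = ((2 * k + 1 : Nat) : Int) := by push_cast; ring
  have h2 : (0 : Int) + 2 * (k : Int) + 2 = ((2 * k + 2 : Nat) : Int) := by push_cast; ring
  simp only [h1, h2, gB, PySem.Chars.slice_eq_listSlice, PySem.List.slice_natCast]
  congr 2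
  omega

-- ===== VERDICT (by name: the statement is the Claim_ definition above) =====
theorem even_replace_spec : Claim_equal_even_replace := by
  intro string replace _
  unfold Spec_even_replace
  rw [portA_eq, portB_eq]
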